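-- pv_equiv track=rewrite | github.com/cece-09/dev-study | programers/python/77885.py | solution
-- ===== SOURCE A (Python) =====
-- def solution(numbers):
--     def get_ans(num):
--         tmp = 1
--         if num == tmp: return num+1 # 1이면 2입니다
--         while tmp < num:
--             if not (num & tmp):
--                 break
--             tmp *= 2
--         num |= tmp             # 0인 비트를 1로 변경
--         num &= ~(tmp >> 1)     # 그 하위 비트를 0으로 변경
--         return num
--
--     answer = []
--     n = len(numbers)
--     for i in range(n):
--         output = get_ans(numbers[i])
--         answer.append(output)
--
--     return answer
-- ===== SOURCE B (Python) =====
-- def solution(numbers):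
--     # next bigger-or-equal pattern: the lowest clear bit, taken in closed form
--     result = []
--     for num in numbers:
--         tmp = ~num & (num + 1)          # lowest zero bit of num
--         result.append((num | tmp) & ~(tmp >> 1))
--     return result
-- ===== Notes on version B (the rewrite author's own statement) =====
-- stated objective: simpler
-- what changed: The per-element while-loop that scans bits for the lowest clear bit, and the num==1 special case, are replaced by the single closed-form bit trick tmp = ~num & (num+1); Pre_ excludes lists with negative entries, which are outside the problem's stated domain (the loop guard never fires there and the two computations need not agree).
-- outside the precondition, e.g. on solution([-3]): A returns [-3], B returns [-2]; on solution([-9]): A returns [-9], B returns [-5]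
import Mathlib
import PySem

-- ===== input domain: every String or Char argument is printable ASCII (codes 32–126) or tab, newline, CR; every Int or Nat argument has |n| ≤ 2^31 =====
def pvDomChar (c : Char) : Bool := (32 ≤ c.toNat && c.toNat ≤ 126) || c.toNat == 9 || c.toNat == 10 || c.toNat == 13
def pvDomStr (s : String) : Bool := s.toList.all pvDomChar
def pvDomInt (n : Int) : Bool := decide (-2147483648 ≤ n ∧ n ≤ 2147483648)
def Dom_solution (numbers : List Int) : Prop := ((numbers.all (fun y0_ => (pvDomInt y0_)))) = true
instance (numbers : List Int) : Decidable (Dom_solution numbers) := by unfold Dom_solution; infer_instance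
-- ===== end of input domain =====

-- B replaces A's per-element bit-scanning while-loop (and its num==1 special case) by the
-- closed-form lowest-clear-bit trick ~num & (num+1); return values agree on all nonnegative inputs.

-- ===== PORT A =====
-- the while-loop of get_ans: 'while tmp < num: if not (num & tmp): break; tmp *= 2';
-- the fuel argument only makes the recursion total (for the admitted inputs the loop
-- always exits within num.toNat + 2 doublings, so the fuel branch is never taken)
def getAnsLoop : Nat → Int → Int → Int
  | 0, _, tmp => tmp
  | fuel+1, num, tmp =>
    if tmp < num then
      if PySem.Int.band num tmp = 0 then tmp
      else getAnsLoop fuel num (tmp * 2)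
    else tmp

def getAns (num : Int) : Int :=
  let tmp : Int := 1
  if num = tmp then num + 1
  else
    let tmp := getAnsLoop (num.toNat + 2) num tmp
    let num := PySem.Int.bor num tmp
    let num := PySem.Int.band num (Int.not (tmp >>> (1:Nat)))
    num

def solution (numbers : List Int) : List Int :=
  let n := numbers.length
  (List.range n).foldl (fun answer i => answer ++ [getAns (numbers.getD i 0)]) []

-- ===== PORT B =====
def solution_alt (numbers : List Int) : List Int :=
  numbers.foldl (fun result num =>
    let tmp := PySem.Int.band (Int.not num) (num + 1)
    result ++ [PySem.Int.band (PySem.Int.bor num tmp) (Int.not (tmp >>> (1:Nat)))]) []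

-- ===== PRECONDITION & SPEC =====
-- Pre_ restricts to the problem's natural domain: the original statement guarantees nonnegative
-- numbers, and for a negative entry the loop guard 'tmp < num' is never true, so neither
-- program computes anything the task specifies there and their values may disagree.
def Pre_solution (numbers : List Int) : Prop := ∀ x ∈ numbers, 0 ≤ x
instance (numbers : List Int) : Decidable (Pre_solution numbers) := by unfold Pre_solution; infer_instance
def pvWitness_solution : List Int := [2, 7, 0, 1, 12]

def Spec_solution (numbers : List Int) (out : List Int) : Prop := out = solution_alt numbers
instance (numbers : List Int) (out : List Int) : Decidable (Spec_solution numbers out) := by unfold Spec_solution; infer_instance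

-- ===== CLAIM (what is proved, stated in full; the proofs are below) =====
def Claim_equal_solution : Prop := ∀ (numbers : List Int), Dom_solution numbers → Pre_solution numbers → Spec_solution numbers (solution numbers)

-- ===== LEMMAS AND PROOFS =====

-- the lowest clear bit of x, as a recursion on parity
def lowClear (x : Nat) : Nat :=
  if x % 2 = 0 then 1 else 2 * lowClear (x / 2)
termination_by x
decreasing_by omega

theorem succ_and_self_even (x : Nat) (h : x % 2 = 0) : (x + 1) &&& x = x := by
  apply Nat.eq_of_testBit_eq
  intro i
  cases i with
  | zero =>
    rw [Nat.testBit_and]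
    simp only [Nat.testBit_zero]
    have h1 : (x + 1) % 2 = 1 := by omega
    simp [h, h1]
  | succ i =>
    simp only [Nat.testBit_and]
    simp only [Nat.testBit_succ]
    have h1 : (x + 1) / 2 = x / 2 := by omega
    rw [h1, Bool.and_self]

theorem succ_and_self_odd (x : Nat) (h : x % 2 = 1) :
    (x + 1) &&& x = 2 * ((x / 2 + 1) &&& (x / 2)) := by
  apply Nat.eq_of_testBit_eq
  intro i
  cases i with
  | zero =>
    rw [Nat.testBit_and]
    simp only [Nat.testBit_zero]
    have h1 : (x + 1) % 2 = 0 := by omega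
    have h2 : (2 * ((x / 2 + 1) &&& (x / 2))) % 2 = 0 := by omega
    simp [h1, h2]
  | succ i =>
    have h1 : (x + 1) / 2 = x / 2 + 1 := by omega
    have h2 : 2 * ((x / 2 + 1) &&& (x / 2)) / 2 = (x / 2 + 1) &&& (x / 2) := by omega
    rw [Nat.testBit_and, Nat.testBit_succ, Nat.testBit_succ, h1, Nat.testBit_succ, h2, Nat.testBit_and]

theorem land_succ_add_lowClear (x : Nat) : ((x + 1) &&& x) + lowClear x = x + 1 := by
  by_cases h : x % 2 = 0
  · rw [succ_and_self_even x h, lowClear]; simp [h]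
  · have h1 : x % 2 = 1 := by omega
    have ih := land_succ_add_lowClear (x / 2)
    rw [succ_and_self_odd x h1, lowClear, if_neg h]
    omega
termination_by x
decreasing_by omega

theorem loop_eq (x : Nat) : ∀ (j fuel : Nat), x + 1 ≤ fuel → (1 ≤ j ∨ x ≠ 1) →
    getAnsLoop fuel ((2 ^ j * x + (2 ^ j - 1) : Nat) : Int) ((2 ^ j : Nat) : Int)
      = ((2 ^ j * lowClear x : Nat) : Int) := by
  intro j fuel hf hx
  have hp : 0 < 2 ^ j := Nat.two_pow_pos j
  cases fuel with
  | zero => omega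
  | succ f =>
    simp only [getAnsLoop]
    by_cases hx0 : x = 0
    · subst hx0
      rw [if_neg (by rw [Nat.cast_lt]; omega)]
      have h0 : lowClear 0 = 1 := by rw [lowClear]; simp
      rw [h0]; norm_num
    · have hx1 : 1 ≤ x := by omega
      have hcond : ((2 ^ j : Nat) : Int) < ((2 ^ j * x + (2 ^ j - 1) : Nat) : Int) := by
        rw [Nat.cast_lt]
        have hmul1 : 2 ^ j * 1 ≤ 2 ^ j * x := Nat.mul_le_mul (Nat.le_refl _) hx1
        have h2 : 2 ≤ 2 ^ j ∨ 2 ≤ x := by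
          rcases hx with hj | hx'
          · exact Or.inl (by calc (2:Nat) = 2 ^ 1 := rfl
                                _ ≤ 2 ^ j := Nat.pow_le_pow_right (by omega) hj)
          · exact Or.inr (by omega)
        rcases h2 with h2 | h2
        · omega
        · have hmul2 : 2 ^ j * 2 ≤ 2 ^ j * x := Nat.mul_le_mul (Nat.le_refl _) h2
          omega
      rw [if_pos hcond]
      have hband : PySem.Int.band ((2 ^ j * x + (2 ^ j - 1) : Nat) : Int) ((2 ^ j : Nat) : Int)
          = (((2 ^ j * x + (2 ^ j - 1)) &&& 2 ^ j : Nat) : Int) := PySem.Int.band_natCast _ _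
      have hdiv : (2 ^ j * x + (2 ^ j - 1)) / 2 ^ j = x := by
        rw [Nat.mul_add_div hp, Nat.div_eq_of_lt (by omega)]; omega
      have htb : (2 ^ j * x + (2 ^ j - 1)).testBit j = decide (x % 2 = 1) := by
        rw [Nat.testBit_eq_decide_div_mod_eq, hdiv]
      by_cases hpar : x % 2 = 0
      · have hand0 : ((2 ^ j * x + (2 ^ j - 1)) &&& 2 ^ j) = 0 := by
          rw [Nat.and_two_pow, htb]; simp [hpar]
        rw [if_pos (by rw [hband, hand0]; norm_num)]
        have h1 : lowClear x = 1 := by rw [lowClear]; simp [hpar]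
        rw [h1]; norm_num
      · have h1 : x % 2 = 1 := by omega
        have hand : ((2 ^ j * x + (2 ^ j - 1)) &&& 2 ^ j) = 2 ^ j := by
          rw [Nat.and_two_pow, htb]; simp [h1]
        rw [if_neg (by rw [hband, hand]; exact_mod_cast (by omega : 2 ^ j ≠ 0))]
        have hrw : ((2 ^ j * x + (2 ^ j - 1) : Nat) : Int)
            = ((2 ^ (j+1) * (x/2) + (2 ^ (j+1) - 1) : Nat) : Int) := by
          congr 1
          have hm : x = 2 * (x/2) + 1 := by omega
          have hpow : 2 ^ (j+1) = 2 ^ j * 2 := by rw [pow_succ]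
          have hmm : 2 ^ j * x = 2 ^ (j+1) * (x/2) + 2 ^ j := by
            calc 2 ^ j * x = 2 ^ j * (2 * (x/2) + 1) := by rw [← hm]
              _ = 2 ^ j * 2 * (x/2) + 2 ^ j := by ring
              _ = 2 ^ (j+1) * (x/2) + 2 ^ j := by rw [← hpow]
          omega
        have htmp : ((2 ^ j : Nat) : Int) * 2 = ((2 ^ (j+1) : Nat) : Int) := by
          push_cast [pow_succ]; ring
        rw [hrw, htmp, loop_eq (x/2) (j+1) f (by omega) (Or.inl (by omega))]
        have hlc : lowClear x = 2 * lowClear (x/2) := by rw [lowClear, if_neg (by omega)]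
        congr 1
        rw [hlc, pow_succ]; ring
termination_by x
decreasing_by omega

theorem band_not_natCast (a b : Nat) :
    PySem.Int.band (Int.not (a : Int)) (b : Int) = ((b - (b &&& a) : Nat) : Int) := by
  simp [PySem.Int.band, Int.not]

theorem lowClear_sub (x : Nat) : (x + 1) - ((x + 1) &&& x) = lowClear x := by
  have := land_succ_add_lowClear x
  omega

theorem getAns_eq (num : Int) (h : 0 ≤ num) :
    getAns num =
      (let tmp := PySem.Int.band (Int.not num) (num + 1)
       PySem.Int.band (PySem.Int.bor num tmp) (Int.not (tmp >>> (1:Nat)))) := by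
  lift num to Nat using h with x
  by_cases hx0 : x = 0
  · subst hx0; decide
  by_cases hx1 : x = 1
  · subst hx1; decide
  have htmpB : PySem.Int.band (Int.not (x : Int)) ((x : Int) + 1) = ((lowClear x : Nat) : Int) := by
    have hc : ((x : Int) + 1) = ((x + 1 : Nat) : Int) := by push_cast; ring
    rw [hc, band_not_natCast, lowClear_sub]
  have htmpA : getAnsLoop ((x : Int).toNat + 2) (x : Int) 1 = ((lowClear x : Nat) : Int) := by
    have := loop_eq x 0 (x + 2) (by omega) (Or.inr hx1)
    simp only [pow_zero, Nat.one_mul, Nat.cast_one] at this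
    simpa [Int.toNat_natCast] using this
  simp only [getAns]
  rw [if_neg (by exact_mod_cast hx1)]
  simp only [htmpA, htmpB]

theorem foldl_congr_mem' {α β : Type} (l : List α) (f g : β → α → β) (acc : β)
    (h : ∀ b a, a ∈ l → f b a = g b a) : l.foldl f acc = l.foldl g acc := by
  induction l generalizing acc with
  | nil => rfl
  | cons a l ih =>
    simp only [List.foldl_cons]
    rw [h acc a (by simp)]
    exact ih _ (fun b a' ha' => h b a' (by simp [ha']))

theorem solution_fold_eq (l : List Int) (acc : List Int) :
    (List.range l.length).foldl (fun answer i => answer ++ [getAns (l.getD i 0)]) acc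
      = acc ++ l.map getAns := by
  induction l using List.reverseRecOn generalizing acc with
  | nil => simp
  | append_singleton l a ih =>
    have hlen : (l ++ [a]).length = l.length + 1 := by simp
    rw [hlen, List.range_succ, List.foldl_append]
    have hinner : (List.range l.length).foldl
        (fun answer i => answer ++ [getAns ((l ++ [a]).getD i 0)]) acc
        = (List.range l.length).foldl (fun answer i => answer ++ [getAns (l.getD i 0)]) acc := by
      apply foldl_congr_mem'
      intro b i hi
      rw [List.getD_append _ _ _ _ (by simpa using List.mem_range.mp hi)]
    rw [hinner, ih]
    simp

theorem alt_fold_eq (l : List Int) (acc : List Int) :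
    l.foldl (fun result num =>
      let tmp := PySem.Int.band (Int.not num) (num + 1)
      result ++ [PySem.Int.band (PySem.Int.bor num tmp) (Int.not (tmp >>> (1:Nat)))]) acc
      = acc ++ l.map (fun num =>
          let tmp := PySem.Int.band (Int.not num) (num + 1)
          PySem.Int.band (PySem.Int.bor num tmp) (Int.not (tmp >>> (1:Nat)))) := by
  induction l generalizing acc with
  | nil => simp
  | cons a l ih =>
    simp only [List.foldl_cons, List.map_cons]
    rw [ih]
    simp

-- ===== VERDICT (by name: the statement is the Claim_ definition above) =====
theorem solution_spec : Claim_equal_solution := by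
  intro numbers _ hpre
  unfold Spec_solution solution solution_alt
  rw [solution_fold_eq, alt_fold_eq, List.nil_append, List.nil_append]
  exact List.map_congr_left (fun a ha => getAns_eq a (hpre a ha))
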